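-- pv_equiv track=rewrite | github.com/Axagon79/simulatore-calcio-backend | functions_python/ai_engine/calculators/generate_bollette_2.py | _curve_lookup
-- ===== SOURCE A (Python) =====
-- STREAK_CURVES = {
--     "vittorie":       {1: 0, 2: 1, 3: 2, 4: 3, 5: 0, 6: -1, 7: -2, 8: -3, "9+": -5},
--     "sconfitte":      {1: 0, 2: -1, 3: -2, 4: -3, 5: 0, 6: 1, 7: 2, 8: 3, "9+": 5},
--     "imbattibilita":  {"1-2": 0, "3-4": 1, "5-6": 2, "7-8": 0, 9: -1, 10: -2, 11: -3, "12+": -5},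
--     "pareggi":        {1: 0, 2: -1, 3: -1, 4: -2, 5: -3, 6: -2, 7: -1, "8+": -2},
--     "senza_vittorie": {"1-2": 0, "3-4": -1, "5-6": -2, "7-8": 0, 9: 1, 10: 2, 11: 3, "12+": 4},
--     "over25":         {1: 0, 2: 1, 3: 2, 4: 3, 5: 0, 6: -1, 7: -2, "8+": -4},
--     "under25":        {1: 0, 2: 1, 3: 2, 4: 3, 5: 0, 6: -1, 7: -2, "8+": -4},
--     "gg":             {1: 0, 2: 1, 3: 2, 4: 3, 5: 0, 6: -1, 7: -2, "8+": -4},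
--     "clean_sheet":    {1: 0, 2: 1, 3: 2, 4: 3, 5: 0, 6: -1, 7: -2, "8+": -4},
--     "senza_segnare":  {1: 0, 2: 1, 3: 2, 4: 3, 5: 0, 6: -1, 7: -2, "8+": -4},
--     "gol_subiti":     {1: 0, 2: 1, 3: 2, 4: 3, 5: 0, 6: -1, 7: -2, "8+": -4},
-- }
--
-- def _curve_lookup(streak_type, n):
--     """Lookup nella curva a campana: striscia tipo + lunghezza → bonus/malus."""
--     if n <= 0:
--         return 0
--     curve = STREAK_CURVES.get(streak_type, {})
--     if n in curve:
--         return curve[n]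
--     for key, value in curve.items():
--         if isinstance(key, str):
--             if '+' in key:
--                 min_val = int(key.replace('+', ''))
--                 if n >= min_val:
--                     return value
--             elif '-' in key:
--                 lo, hi = key.split('-')
--                 if int(lo) <= n <= int(hi):
--                     return value
--     return 0
-- ===== SOURCE B (Python) =====
-- # B: normalized static interval tables (lo, hi, value) with hi=None for open-ended;
-- # one scan, no dict membership test and no runtime key parsing.
-- _INTERVALS = {
--     "vittorie":       [(1,1,0),(2,2,1),(3,3,2),(4,4,3),(5,5,0),(6,6,-1),(7,7,-2),(8,8,-3),(9,None,-5)],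
--     "sconfitte":      [(1,1,0),(2,2,-1),(3,3,-2),(4,4,-3),(5,5,0),(6,6,1),(7,7,2),(8,8,3),(9,None,5)],
--     "imbattibilita":  [(1,2,0),(3,4,1),(5,6,2),(7,8,0),(9,9,-1),(10,10,-2),(11,11,-3),(12,None,-5)],
--     "pareggi":        [(1,1,0),(2,2,-1),(3,3,-1),(4,4,-2),(5,5,-3),(6,6,-2),(7,7,-1),(8,None,-2)],
--     "senza_vittorie": [(1,2,0),(3,4,-1),(5,6,-2),(7,8,0),(9,9,1),(10,10,2),(11,11,3),(12,None,4)],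
--     "over25":         [(1,1,0),(2,2,1),(3,3,2),(4,4,3),(5,5,0),(6,6,-1),(7,7,-2),(8,None,-4)],
--     "under25":        [(1,1,0),(2,2,1),(3,3,2),(4,4,3),(5,5,0),(6,6,-1),(7,7,-2),(8,None,-4)],
--     "gg":             [(1,1,0),(2,2,1),(3,3,2),(4,4,3),(5,5,0),(6,6,-1),(7,7,-2),(8,None,-4)],
--     "clean_sheet":    [(1,1,0),(2,2,1),(3,3,2),(4,4,3),(5,5,0),(6,6,-1),(7,7,-2),(8,None,-4)],
--     "senza_segnare":  [(1,1,0),(2,2,1),(3,3,2),(4,4,3),(5,5,0),(6,6,-1),(7,7,-2),(8,None,-4)],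
--     "gol_subiti":     [(1,1,0),(2,2,1),(3,3,2),(4,4,3),(5,5,0),(6,6,-1),(7,7,-2),(8,None,-4)],
-- }
--
-- def _curve_lookup(streak_type, n):
--     if n <= 0:
--         return 0
--     for lo, hi, val in _INTERVALS.get(streak_type, ()):
--         if lo <= n and (hi is None or n <= hi):
--             return val
--     return 0
-- ===== Notes on version B (the rewrite author's own statement) =====
-- stated objective: simpler
-- what changed: Replaces the two-phase lookup (dict membership fast path, then a scan that parses 'x+'/'x-y' string keys at runtime) with a statically normalized table of (lo, hi, value) intervals and a single first-match scan.
import Mathlib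
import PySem

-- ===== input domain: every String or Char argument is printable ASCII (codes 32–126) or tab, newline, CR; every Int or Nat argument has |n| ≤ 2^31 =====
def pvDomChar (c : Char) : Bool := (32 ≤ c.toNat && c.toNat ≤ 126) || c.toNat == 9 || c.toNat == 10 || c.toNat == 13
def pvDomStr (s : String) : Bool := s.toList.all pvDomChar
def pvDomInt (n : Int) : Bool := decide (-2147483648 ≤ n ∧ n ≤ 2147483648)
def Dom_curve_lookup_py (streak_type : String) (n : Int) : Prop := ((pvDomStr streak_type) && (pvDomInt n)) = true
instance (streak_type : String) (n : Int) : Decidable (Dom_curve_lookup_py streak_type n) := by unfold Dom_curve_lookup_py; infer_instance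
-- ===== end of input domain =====

-- B replaces A's dict-membership fast path plus runtime parsing of 'x+'/'x-y' string keys
-- by a statically normalized (lo, hi, value) interval table and one first-match scan (objective: simpler).

-- ===== PORT A =====
-- Python dict keys here are mixed int/str: modelled by a sum-like key type.
inductive PKey where
  | ki : Int → PKey
  | ks : String → PKey
deriving DecidableEq, Repr

-- STREAK_CURVES: dict of dicts, in insertion order (association lists).
def STREAK_CURVES : List (String × List (PKey × Int)) :=
  [ ("vittorie",       [(.ki 1, 0), (.ki 2, 1), (.ki 3, 2), (.ki 4, 3), (.ki 5, 0), (.ki 6, -1), (.ki 7, -2), (.ki 8, -3), (.ks "9+", -5)]),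
    ("sconfitte",      [(.ki 1, 0), (.ki 2, -1), (.ki 3, -2), (.ki 4, -3), (.ki 5, 0), (.ki 6, 1), (.ki 7, 2), (.ki 8, 3), (.ks "9+", 5)]),
    ("imbattibilita",  [(.ks "1-2", 0), (.ks "3-4", 1), (.ks "5-6", 2), (.ks "7-8", 0), (.ki 9, -1), (.ki 10, -2), (.ki 11, -3), (.ks "12+", -5)]),
    ("pareggi",        [(.ki 1, 0), (.ki 2, -1), (.ki 3, -1), (.ki 4, -2), (.ki 5, -3), (.ki 6, -2), (.ki 7, -1), (.ks "8+", -2)]),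
    ("senza_vittorie", [(.ks "1-2", 0), (.ks "3-4", -1), (.ks "5-6", -2), (.ks "7-8", 0), (.ki 9, 1), (.ki 10, 2), (.ki 11, 3), (.ks "12+", 4)]),
    ("over25",         [(.ki 1, 0), (.ki 2, 1), (.ki 3, 2), (.ki 4, 3), (.ki 5, 0), (.ki 6, -1), (.ki 7, -2), (.ks "8+", -4)]),
    ("under25",        [(.ki 1, 0), (.ki 2, 1), (.ki 3, 2), (.ki 4, 3), (.ki 5, 0), (.ki 6, -1), (.ki 7, -2), (.ks "8+", -4)]),
    ("gg",             [(.ki 1, 0), (.ki 2, 1), (.ki 3, 2), (.ki 4, 3), (.ki 5, 0), (.ki 6, -1), (.ki 7, -2), (.ks "8+", -4)]),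
    ("clean_sheet",    [(.ki 1, 0), (.ki 2, 1), (.ki 3, 2), (.ki 4, 3), (.ki 5, 0), (.ki 6, -1), (.ki 7, -2), (.ks "8+", -4)]),
    ("senza_segnare",  [(.ki 1, 0), (.ki 2, 1), (.ki 3, 2), (.ki 4, 3), (.ki 5, 0), (.ki 6, -1), (.ki 7, -2), (.ks "8+", -4)]),
    ("gol_subiti",     [(.ki 1, 0), (.ki 2, 1), (.ki 3, 2), (.ki 4, 3), (.ki 5, 0), (.ki 6, -1), (.ki 7, -2), (.ks "8+", -4)]) ]

-- the 'for key, value in curve.items()' loop of A, step for step.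
-- int(...) on the table's keys never fails and `lo, hi = key.split('-')` always has arity 2
-- for keys containing '-'; the impossible-failure arms return 0 (Python would raise, unreachable).
def aScan (curve : List (PKey × Int)) (n : Int) : Int :=
  match curve with
  | [] => 0
  | (key, value) :: rest =>
    match key with
    | .ki _ => aScan rest n
    | .ks s =>
      if PySem.Str.isIn "+" s then
        (if n ≥ (PySem.Int.ofStr? (PySem.Str.replace s "+" "")).getD 0 then value else aScan rest n)
      else if PySem.Str.isIn "-" s then
        match (PySem.Str.split? s "-").getD [] with
        | [lo, hi] =>
          if (PySem.Int.ofStr? lo).getD 0 ≤ n ∧ n ≤ (PySem.Int.ofStr? hi).getD 0 then value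
          else aScan rest n
        | _ => 0
      else aScan rest n

def curve_lookup_py (streak_type : String) (n : Int) : Int :=
  if n ≤ 0 then 0
  else
    let curve := ((STREAK_CURVES.find? (fun p => p.1 == streak_type)).map (·.2)).getD []
    -- `if n in curve: return curve[n]` — membership then first-match value
    if curve.any (fun kv => kv.1 == PKey.ki n) then
      match curve.find? (fun kv => kv.1 == PKey.ki n) with
      | some kv => kv.2
      | none => 0   -- unreachable: membership just held
    else aScan curve n

-- ===== PORT B =====
-- normalized intervals: (lo, hi, value), hi = none means open-ended
def INTERVALS : List (String × List (Int × Option Int × Int)) :=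
  [ ("vittorie",       [(1, some 1, 0), (2, some 2, 1), (3, some 3, 2), (4, some 4, 3), (5, some 5, 0), (6, some 6, -1), (7, some 7, -2), (8, some 8, -3), (9, none, -5)]),
    ("sconfitte",      [(1, some 1, 0), (2, some 2, -1), (3, some 3, -2), (4, some 4, -3), (5, some 5, 0), (6, some 6, 1), (7, some 7, 2), (8, some 8, 3), (9, none, 5)]),
    ("imbattibilita",  [(1, some 2, 0), (3, some 4, 1), (5, some 6, 2), (7, some 8, 0), (9, some 9, -1), (10, some 10, -2), (11, some 11, -3), (12, none, -5)]),
    ("pareggi",        [(1, some 1, 0), (2, some 2, -1), (3, some 3, -1), (4, some 4, -2), (5, some 5, -3), (6, some 6, -2), (7, some 7, -1), (8, none, -2)]),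
    ("senza_vittorie", [(1, some 2, 0), (3, some 4, -1), (5, some 6, -2), (7, some 8, 0), (9, some 9, 1), (10, some 10, 2), (11, some 11, 3), (12, none, 4)]),
    ("over25",         [(1, some 1, 0), (2, some 2, 1), (3, some 3, 2), (4, some 4, 3), (5, some 5, 0), (6, some 6, -1), (7, some 7, -2), (8, none, -4)]),
    ("under25",        [(1, some 1, 0), (2, some 2, 1), (3, some 3, 2), (4, some 4, 3), (5, some 5, 0), (6, some 6, -1), (7, some 7, -2), (8, none, -4)]),
    ("gg",             [(1, some 1, 0), (2, some 2, 1), (3, some 3, 2), (4, some 4, 3), (5, some 5, 0), (6, some 6, -1), (7, some 7, -2), (8, none, -4)]),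
    ("clean_sheet",    [(1, some 1, 0), (2, some 2, 1), (3, some 3, 2), (4, some 4, 3), (5, some 5, 0), (6, some 6, -1), (7, some 7, -2), (8, none, -4)]),
    ("senza_segnare",  [(1, some 1, 0), (2, some 2, 1), (3, some 3, 2), (4, some 4, 3), (5, some 5, 0), (6, some 6, -1), (7, some 7, -2), (8, none, -4)]),
    ("gol_subiti",     [(1, some 1, 0), (2, some 2, 1), (3, some 3, 2), (4, some 4, 3), (5, some 5, 0), (6, some 6, -1), (7, some 7, -2), (8, none, -4)]) ]

def bScan (ivs : List (Int × Option Int × Int)) (n : Int) : Int :=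
  match ivs with
  | [] => 0
  | (lo, hi, val) :: rest =>
    if lo ≤ n ∧ (hi = none ∨ n ≤ hi.getD 0) then val else bScan rest n

def curve_lookup_py_alt (streak_type : String) (n : Int) : Int :=
  if n ≤ 0 then 0
  else bScan (((INTERVALS.find? (fun p => p.1 == streak_type)).map (·.2)).getD []) n

-- ===== PRECONDITION & SPEC =====
def Spec_curve_lookup_py (streak_type : String) (n : Int) (out : Int) : Prop := out = curve_lookup_py_alt streak_type n
instance (streak_type : String) (n : Int) (out : Int) : Decidable (Spec_curve_lookup_py streak_type n out) := by unfold Spec_curve_lookup_py; infer_instance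

-- ===== CLAIM (what is proved, stated in full; the proofs are below) =====
def Claim_equal_curve_lookup_py : Prop := ∀ (streak_type : String) (n : Int), Dom_curve_lookup_py streak_type n → Spec_curve_lookup_py streak_type n (curve_lookup_py streak_type n)

-- ===== LEMMAS AND PROOFS =====

lemma aScan_ki (m v : Int) (rest : List (PKey × Int)) (n : Int) :
    aScan ((.ki m, v) :: rest) n = aScan rest n := by rw [aScan]

lemma aScan_plus (s : String) (v m : Int) (rest : List (PKey × Int)) (n : Int)
    (h1 : PySem.Str.isIn "+" s = true)
    (h2 : (PySem.Int.ofStr? (PySem.Str.replace s "+" "")).getD 0 = m) :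
    aScan ((.ks s, v) :: rest) n = if n ≥ m then v else aScan rest n := by
  rw [aScan, h1, h2]; simp

lemma aScan_range (s lo hi : String) (v l h : Int) (rest : List (PKey × Int)) (n : Int)
    (h1 : PySem.Str.isIn "+" s = false)
    (h2 : PySem.Str.isIn "-" s = true)
    (h3 : (PySem.Str.split? s "-").getD [] = [lo, hi])
    (h4 : (PySem.Int.ofStr? lo).getD 0 = l)
    (h5 : (PySem.Int.ofStr? hi).getD 0 = h) :
    aScan ((.ks s, v) :: rest) n = if l ≤ n ∧ n ≤ h then v else aScan rest n := by
  rw [aScan, h1, h2, h3]; simp [h4, h5]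

lemma aScan_vittorie (n : Int) :
    aScan [(PKey.ki 1, 0), (PKey.ki 2, 1), (PKey.ki 3, 2), (PKey.ki 4, 3), (PKey.ki 5, 0), (PKey.ki 6, -1), (PKey.ki 7, -2), (PKey.ki 8, -3), (PKey.ks "9+", -5)] n = (if n ≥ 9 then -5 else 0) := by
  rw [aScan_ki, aScan_ki, aScan_ki, aScan_ki, aScan_ki, aScan_ki, aScan_ki, aScan_ki, aScan_plus "9+" (-5) 9 _ n (by decide) (by decide), aScan]


lemma aScan_sconfitte (n : Int) :
    aScan [(PKey.ki 1, 0), (PKey.ki 2, -1), (PKey.ki 3, -2), (PKey.ki 4, -3), (PKey.ki 5, 0), (PKey.ki 6, 1), (PKey.ki 7, 2), (PKey.ki 8, 3), (PKey.ks "9+", 5)] n = (if n ≥ 9 then 5 else 0) := by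
  rw [aScan_ki, aScan_ki, aScan_ki, aScan_ki, aScan_ki, aScan_ki, aScan_ki, aScan_ki, aScan_plus "9+" (5) 9 _ n (by decide) (by decide), aScan]


lemma aScan_imbattibilita (n : Int) :
    aScan [(PKey.ks "1-2", 0), (PKey.ks "3-4", 1), (PKey.ks "5-6", 2), (PKey.ks "7-8", 0), (PKey.ki 9, -1), (PKey.ki 10, -2), (PKey.ki 11, -3), (PKey.ks "12+", -5)] n = (if 1 ≤ n ∧ n ≤ 2 then 0 else if 3 ≤ n ∧ n ≤ 4 then 1 else if 5 ≤ n ∧ n ≤ 6 then 2 else if 7 ≤ n ∧ n ≤ 8 then 0 else if n ≥ 12 then -5 else 0) := by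
  rw [aScan_range "1-2" "1" "2" (0) 1 2 _ n (by decide) (by decide) (by decide) (by decide) (by decide), aScan_range "3-4" "3" "4" (1) 3 4 _ n (by decide) (by decide) (by decide) (by decide) (by decide), aScan_range "5-6" "5" "6" (2) 5 6 _ n (by decide) (by decide) (by decide) (by decide) (by decide), aScan_range "7-8" "7" "8" (0) 7 8 _ n (by decide) (by decide) (by decide) (by decide) (by decide), aScan_ki, aScan_ki, aScan_ki, aScan_plus "12+" (-5) 12 _ n (by decide) (by decide), aScan]


lemma aScan_pareggi (n : Int) :
    aScan [(PKey.ki 1, 0), (PKey.ki 2, -1), (PKey.ki 3, -1), (PKey.ki 4, -2), (PKey.ki 5, -3), (PKey.ki 6, -2), (PKey.ki 7, -1), (PKey.ks "8+", -2)] n = (if n ≥ 8 then -2 else 0) := by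
  rw [aScan_ki, aScan_ki, aScan_ki, aScan_ki, aScan_ki, aScan_ki, aScan_ki, aScan_plus "8+" (-2) 8 _ n (by decide) (by decide), aScan]


lemma aScan_senza_vittorie (n : Int) :
    aScan [(PKey.ks "1-2", 0), (PKey.ks "3-4", -1), (PKey.ks "5-6", -2), (PKey.ks "7-8", 0), (PKey.ki 9, 1), (PKey.ki 10, 2), (PKey.ki 11, 3), (PKey.ks "12+", 4)] n = (if 1 ≤ n ∧ n ≤ 2 then 0 else if 3 ≤ n ∧ n ≤ 4 then -1 else if 5 ≤ n ∧ n ≤ 6 then -2 else if 7 ≤ n ∧ n ≤ 8 then 0 else if n ≥ 12 then 4 else 0) := by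
  rw [aScan_range "1-2" "1" "2" (0) 1 2 _ n (by decide) (by decide) (by decide) (by decide) (by decide), aScan_range "3-4" "3" "4" (-1) 3 4 _ n (by decide) (by decide) (by decide) (by decide) (by decide), aScan_range "5-6" "5" "6" (-2) 5 6 _ n (by decide) (by decide) (by decide) (by decide) (by decide), aScan_range "7-8" "7" "8" (0) 7 8 _ n (by decide) (by decide) (by decide) (by decide) (by decide), aScan_ki, aScan_ki, aScan_ki, aScan_plus "12+" (4) 12 _ n (by decide) (by decide), aScan]


lemma aScan_over25 (n : Int) :
    aScan [(PKey.ki 1, 0), (PKey.ki 2, 1), (PKey.ki 3, 2), (PKey.ki 4, 3), (PKey.ki 5, 0), (PKey.ki 6, -1), (PKey.ki 7, -2), (PKey.ks "8+", -4)] n = (if n ≥ 8 then -4 else 0) := by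
  rw [aScan_ki, aScan_ki, aScan_ki, aScan_ki, aScan_ki, aScan_ki, aScan_ki, aScan_plus "8+" (-4) 8 _ n (by decide) (by decide), aScan]


lemma aScan_under25 (n : Int) :
    aScan [(PKey.ki 1, 0), (PKey.ki 2, 1), (PKey.ki 3, 2), (PKey.ki 4, 3), (PKey.ki 5, 0), (PKey.ki 6, -1), (PKey.ki 7, -2), (PKey.ks "8+", -4)] n = (if n ≥ 8 then -4 else 0) := by
  rw [aScan_ki, aScan_ki, aScan_ki, aScan_ki, aScan_ki, aScan_ki, aScan_ki, aScan_plus "8+" (-4) 8 _ n (by decide) (by decide), aScan]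


lemma aScan_gg (n : Int) :
    aScan [(PKey.ki 1, 0), (PKey.ki 2, 1), (PKey.ki 3, 2), (PKey.ki 4, 3), (PKey.ki 5, 0), (PKey.ki 6, -1), (PKey.ki 7, -2), (PKey.ks "8+", -4)] n = (if n ≥ 8 then -4 else 0) := by
  rw [aScan_ki, aScan_ki, aScan_ki, aScan_ki, aScan_ki, aScan_ki, aScan_ki, aScan_plus "8+" (-4) 8 _ n (by decide) (by decide), aScan]


lemma aScan_clean_sheet (n : Int) :
    aScan [(PKey.ki 1, 0), (PKey.ki 2, 1), (PKey.ki 3, 2), (PKey.ki 4, 3), (PKey.ki 5, 0), (PKey.ki 6, -1), (PKey.ki 7, -2), (PKey.ks "8+", -4)] n = (if n ≥ 8 then -4 else 0) := by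
  rw [aScan_ki, aScan_ki, aScan_ki, aScan_ki, aScan_ki, aScan_ki, aScan_ki, aScan_plus "8+" (-4) 8 _ n (by decide) (by decide), aScan]


lemma aScan_senza_segnare (n : Int) :
    aScan [(PKey.ki 1, 0), (PKey.ki 2, 1), (PKey.ki 3, 2), (PKey.ki 4, 3), (PKey.ki 5, 0), (PKey.ki 6, -1), (PKey.ki 7, -2), (PKey.ks "8+", -4)] n = (if n ≥ 8 then -4 else 0) := by
  rw [aScan_ki, aScan_ki, aScan_ki, aScan_ki, aScan_ki, aScan_ki, aScan_ki, aScan_plus "8+" (-4) 8 _ n (by decide) (by decide), aScan]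


lemma aScan_gol_subiti (n : Int) :
    aScan [(PKey.ki 1, 0), (PKey.ki 2, 1), (PKey.ki 3, 2), (PKey.ki 4, 3), (PKey.ki 5, 0), (PKey.ki 6, -1), (PKey.ki 7, -2), (PKey.ks "8+", -4)] n = (if n ≥ 8 then -4 else 0) := by
  rw [aScan_ki, aScan_ki, aScan_ki, aScan_ki, aScan_ki, aScan_ki, aScan_ki, aScan_plus "8+" (-4) 8 _ n (by decide) (by decide), aScan]


lemma case_vittorie (n : Int) : curve_lookup_py "vittorie" n = curve_lookup_py_alt "vittorie" n := by
  by_cases hn : n ≤ 0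
  · simp [curve_lookup_py, curve_lookup_py_alt, hn]
  by_cases h1 : n = 1
  · subst h1; decide
  by_cases h2 : n = 2
  · subst h2; decide
  by_cases h3 : n = 3
  · subst h3; decide
  by_cases h4 : n = 4
  · subst h4; decide
  by_cases h5 : n = 5
  · subst h5; decide
  by_cases h6 : n = 6
  · subst h6; decide
  by_cases h7 : n = 7
  · subst h7; decide
  by_cases h8 : n = 8
  · subst h8; decide
  · simp [curve_lookup_py, curve_lookup_py_alt, STREAK_CURVES, INTERVALS, hn,
      List.any_cons, beq_iff_eq, PKey.ki.injEq,
      Ne.symm h1, Ne.symm h2, Ne.symm h3, Ne.symm h4, Ne.symm h5, Ne.symm h6, Ne.symm h7, Ne.symm h8, aScan_vittorie, bScan]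
    split_ifs <;> omega

lemma case_sconfitte (n : Int) : curve_lookup_py "sconfitte" n = curve_lookup_py_alt "sconfitte" n := by
  by_cases hn : n ≤ 0
  · simp [curve_lookup_py, curve_lookup_py_alt, hn]
  by_cases h1 : n = 1
  · subst h1; decide
  by_cases h2 : n = 2
  · subst h2; decide
  by_cases h3 : n = 3
  · subst h3; decide
  by_cases h4 : n = 4
  · subst h4; decide
  by_cases h5 : n = 5
  · subst h5; decide
  by_cases h6 : n = 6
  · subst h6; decide
  by_cases h7 : n = 7
  · subst h7; decide
  by_cases h8 : n = 8
  · subst h8; decide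
  · simp [curve_lookup_py, curve_lookup_py_alt, STREAK_CURVES, INTERVALS, hn,
      List.any_cons, beq_iff_eq, PKey.ki.injEq,
      Ne.symm h1, Ne.symm h2, Ne.symm h3, Ne.symm h4, Ne.symm h5, Ne.symm h6, Ne.symm h7, Ne.symm h8, aScan_sconfitte, bScan]
    split_ifs <;> omega

lemma case_imbattibilita (n : Int) : curve_lookup_py "imbattibilita" n = curve_lookup_py_alt "imbattibilita" n := by
  by_cases hn : n ≤ 0
  · simp [curve_lookup_py, curve_lookup_py_alt, hn]
  by_cases h9 : n = 9
  · subst h9; decide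
  by_cases h10 : n = 10
  · subst h10; decide
  by_cases h11 : n = 11
  · subst h11; decide
  · simp [curve_lookup_py, curve_lookup_py_alt, STREAK_CURVES, INTERVALS, hn,
      List.any_cons, beq_iff_eq, PKey.ki.injEq,
      Ne.symm h9, Ne.symm h10, Ne.symm h11, aScan_imbattibilita, bScan]
    split_ifs <;> omega

lemma case_pareggi (n : Int) : curve_lookup_py "pareggi" n = curve_lookup_py_alt "pareggi" n := by
  by_cases hn : n ≤ 0
  · simp [curve_lookup_py, curve_lookup_py_alt, hn]
  by_cases h1 : n = 1
  · subst h1; decide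
  by_cases h2 : n = 2
  · subst h2; decide
  by_cases h3 : n = 3
  · subst h3; decide
  by_cases h4 : n = 4
  · subst h4; decide
  by_cases h5 : n = 5
  · subst h5; decide
  by_cases h6 : n = 6
  · subst h6; decide
  by_cases h7 : n = 7
  · subst h7; decide
  · simp [curve_lookup_py, curve_lookup_py_alt, STREAK_CURVES, INTERVALS, hn,
      List.any_cons, beq_iff_eq, PKey.ki.injEq,
      Ne.symm h1, Ne.symm h2, Ne.symm h3, Ne.symm h4, Ne.symm h5, Ne.symm h6, Ne.symm h7, aScan_pareggi, bScan]
    split_ifs <;> omega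

lemma case_senza_vittorie (n : Int) : curve_lookup_py "senza_vittorie" n = curve_lookup_py_alt "senza_vittorie" n := by
  by_cases hn : n ≤ 0
  · simp [curve_lookup_py, curve_lookup_py_alt, hn]
  by_cases h9 : n = 9
  · subst h9; decide
  by_cases h10 : n = 10
  · subst h10; decide
  by_cases h11 : n = 11
  · subst h11; decide
  · simp [curve_lookup_py, curve_lookup_py_alt, STREAK_CURVES, INTERVALS, hn,
      List.any_cons, beq_iff_eq, PKey.ki.injEq,
      Ne.symm h9, Ne.symm h10, Ne.symm h11, aScan_senza_vittorie, bScan]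
    split_ifs <;> omega

lemma case_over25 (n : Int) : curve_lookup_py "over25" n = curve_lookup_py_alt "over25" n := by
  by_cases hn : n ≤ 0
  · simp [curve_lookup_py, curve_lookup_py_alt, hn]
  by_cases h1 : n = 1
  · subst h1; decide
  by_cases h2 : n = 2
  · subst h2; decide
  by_cases h3 : n = 3
  · subst h3; decide
  by_cases h4 : n = 4
  · subst h4; decide
  by_cases h5 : n = 5
  · subst h5; decide
  by_cases h6 : n = 6
  · subst h6; decide
  by_cases h7 : n = 7
  · subst h7; decide
  · simp [curve_lookup_py, curve_lookup_py_alt, STREAK_CURVES, INTERVALS, hn,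
      List.any_cons, beq_iff_eq, PKey.ki.injEq,
      Ne.symm h1, Ne.symm h2, Ne.symm h3, Ne.symm h4, Ne.symm h5, Ne.symm h6, Ne.symm h7, aScan_over25, bScan]
    split_ifs <;> omega

lemma case_under25 (n : Int) : curve_lookup_py "under25" n = curve_lookup_py_alt "under25" n := by
  by_cases hn : n ≤ 0
  · simp [curve_lookup_py, curve_lookup_py_alt, hn]
  by_cases h1 : n = 1
  · subst h1; decide
  by_cases h2 : n = 2
  · subst h2; decide
  by_cases h3 : n = 3
  · subst h3; decide
  by_cases h4 : n = 4
  · subst h4; decide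
  by_cases h5 : n = 5
  · subst h5; decide
  by_cases h6 : n = 6
  · subst h6; decide
  by_cases h7 : n = 7
  · subst h7; decide
  · simp [curve_lookup_py, curve_lookup_py_alt, STREAK_CURVES, INTERVALS, hn,
      List.any_cons, beq_iff_eq, PKey.ki.injEq,
      Ne.symm h1, Ne.symm h2, Ne.symm h3, Ne.symm h4, Ne.symm h5, Ne.symm h6, Ne.symm h7, aScan_under25, bScan]
    split_ifs <;> omega

lemma case_gg (n : Int) : curve_lookup_py "gg" n = curve_lookup_py_alt "gg" n := by
  by_cases hn : n ≤ 0
  · simp [curve_lookup_py, curve_lookup_py_alt, hn]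
  by_cases h1 : n = 1
  · subst h1; decide
  by_cases h2 : n = 2
  · subst h2; decide
  by_cases h3 : n = 3
  · subst h3; decide
  by_cases h4 : n = 4
  · subst h4; decide
  by_cases h5 : n = 5
  · subst h5; decide
  by_cases h6 : n = 6
  · subst h6; decide
  by_cases h7 : n = 7
  · subst h7; decide
  · simp [curve_lookup_py, curve_lookup_py_alt, STREAK_CURVES, INTERVALS, hn,
      List.any_cons, beq_iff_eq, PKey.ki.injEq,
      Ne.symm h1, Ne.symm h2, Ne.symm h3, Ne.symm h4, Ne.symm h5, Ne.symm h6, Ne.symm h7, aScan_gg, bScan]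
    split_ifs <;> omega

lemma case_clean_sheet (n : Int) : curve_lookup_py "clean_sheet" n = curve_lookup_py_alt "clean_sheet" n := by
  by_cases hn : n ≤ 0
  · simp [curve_lookup_py, curve_lookup_py_alt, hn]
  by_cases h1 : n = 1
  · subst h1; decide
  by_cases h2 : n = 2
  · subst h2; decide
  by_cases h3 : n = 3
  · subst h3; decide
  by_cases h4 : n = 4
  · subst h4; decide
  by_cases h5 : n = 5
  · subst h5; decide
  by_cases h6 : n = 6
  · subst h6; decide
  by_cases h7 : n = 7
  · subst h7; decide
  · simp [curve_lookup_py, curve_lookup_py_alt, STREAK_CURVES, INTERVALS, hn,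
      List.any_cons, beq_iff_eq, PKey.ki.injEq,
      Ne.symm h1, Ne.symm h2, Ne.symm h3, Ne.symm h4, Ne.symm h5, Ne.symm h6, Ne.symm h7, aScan_clean_sheet, bScan]
    split_ifs <;> omega

lemma case_senza_segnare (n : Int) : curve_lookup_py "senza_segnare" n = curve_lookup_py_alt "senza_segnare" n := by
  by_cases hn : n ≤ 0
  · simp [curve_lookup_py, curve_lookup_py_alt, hn]
  by_cases h1 : n = 1
  · subst h1; decide
  by_cases h2 : n = 2
  · subst h2; decide
  by_cases h3 : n = 3
  · subst h3; decide
  by_cases h4 : n = 4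
  · subst h4; decide
  by_cases h5 : n = 5
  · subst h5; decide
  by_cases h6 : n = 6
  · subst h6; decide
  by_cases h7 : n = 7
  · subst h7; decide
  · simp [curve_lookup_py, curve_lookup_py_alt, STREAK_CURVES, INTERVALS, hn,
      List.any_cons, beq_iff_eq, PKey.ki.injEq,
      Ne.symm h1, Ne.symm h2, Ne.symm h3, Ne.symm h4, Ne.symm h5, Ne.symm h6, Ne.symm h7, aScan_senza_segnare, bScan]
    split_ifs <;> omega

lemma case_gol_subiti (n : Int) : curve_lookup_py "gol_subiti" n = curve_lookup_py_alt "gol_subiti" n := by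
  by_cases hn : n ≤ 0
  · simp [curve_lookup_py, curve_lookup_py_alt, hn]
  by_cases h1 : n = 1
  · subst h1; decide
  by_cases h2 : n = 2
  · subst h2; decide
  by_cases h3 : n = 3
  · subst h3; decide
  by_cases h4 : n = 4
  · subst h4; decide
  by_cases h5 : n = 5
  · subst h5; decide
  by_cases h6 : n = 6
  · subst h6; decide
  by_cases h7 : n = 7
  · subst h7; decide
  · simp [curve_lookup_py, curve_lookup_py_alt, STREAK_CURVES, INTERVALS, hn,
      List.any_cons, beq_iff_eq, PKey.ki.injEq,
      Ne.symm h1, Ne.symm h2, Ne.symm h3, Ne.symm h4, Ne.symm h5, Ne.symm h6, Ne.symm h7, aScan_gol_subiti, bScan]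
    split_ifs <;> omega

-- ===== VERDICT (by name: the statement is the Claim_ definition above) =====
theorem curve_lookup_py_spec : Claim_equal_curve_lookup_py := by
  intro st n _
  unfold Spec_curve_lookup_py
  by_cases h_vittorie : st = "vittorie"
  · subst h_vittorie; exact case_vittorie n
  by_cases h_sconfitte : st = "sconfitte"
  · subst h_sconfitte; exact case_sconfitte n
  by_cases h_imbattibilita : st = "imbattibilita"
  · subst h_imbattibilita; exact case_imbattibilita n
  by_cases h_pareggi : st = "pareggi"
  · subst h_pareggi; exact case_pareggi n
  by_cases h_senza_vittorie : st = "senza_vittorie"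
  · subst h_senza_vittorie; exact case_senza_vittorie n
  by_cases h_over25 : st = "over25"
  · subst h_over25; exact case_over25 n
  by_cases h_under25 : st = "under25"
  · subst h_under25; exact case_under25 n
  by_cases h_gg : st = "gg"
  · subst h_gg; exact case_gg n
  by_cases h_clean_sheet : st = "clean_sheet"
  · subst h_clean_sheet; exact case_clean_sheet n
  by_cases h_senza_segnare : st = "senza_segnare"
  · subst h_senza_segnare; exact case_senza_segnare n
  by_cases h_gol_subiti : st = "gol_subiti"
  · subst h_gol_subiti; exact case_gol_subiti n
  · simp [curve_lookup_py, curve_lookup_py_alt, STREAK_CURVES, INTERVALS, beq_iff_eq,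
      Ne.symm h_vittorie, Ne.symm h_sconfitte, Ne.symm h_imbattibilita, Ne.symm h_pareggi, Ne.symm h_senza_vittorie, Ne.symm h_over25, Ne.symm h_under25, Ne.symm h_gg, Ne.symm h_clean_sheet, Ne.symm h_senza_segnare, Ne.symm h_gol_subiti, aScan, bScan]
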